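-- pv_equiv track=rewrite | github.com/Snut5923/Programming-in-PTIT | Code/python/codeptit/lam tron so.py | xuli
-- ===== SOURCE A (Python) =====
-- def xuli(s):
--     a = list(s)
--     kq =""
--     if len(s) > 1:
--         for i in range(len(s)-1,-1,-1):
--             if(int(a[i]) >= 5 and i>0):
--                 a[i] = "0"
--                 a[i-1] = str(int(a[i-1])+1)
--             else:
--                 if i>0: a[i] = "0"
--             kq = a[i] + kq
--         return kq
--     return s
-- ===== SOURCE B (Python) =====
-- def xuli(s):
--     if len(s) <= 1:
--         return s
--     carry = 0
--     for i in range(len(s) - 1, 0, -1):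
--         carry = 1 if int(s[i]) + carry >= 5 else 0
--     return str(int(s[0]) + carry) + "0" * (len(s) - 1)
-- ===== Notes on version B (the rewrite author's own statement) =====
-- stated objective: simpler
-- what changed: B keeps only a single carry integer in the right-to-left pass and formats the result as the leading value followed by n-1 zeros, instead of A's mutating a full character list and prepending each zeroed character to build the string.
import Mathlib
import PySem

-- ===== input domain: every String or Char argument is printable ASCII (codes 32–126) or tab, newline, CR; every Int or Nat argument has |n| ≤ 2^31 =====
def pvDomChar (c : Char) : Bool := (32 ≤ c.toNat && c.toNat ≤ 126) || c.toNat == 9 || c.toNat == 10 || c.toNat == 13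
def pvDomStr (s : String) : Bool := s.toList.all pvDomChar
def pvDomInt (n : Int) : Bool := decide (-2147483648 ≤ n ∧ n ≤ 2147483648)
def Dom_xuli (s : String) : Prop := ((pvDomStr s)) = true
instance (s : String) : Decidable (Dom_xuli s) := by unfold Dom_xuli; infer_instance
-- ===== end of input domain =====

-- B rounds the digit string with a single carry integer and formats the output as the leading value followed by n-1 zeros,
-- instead of A's mutating a full character list and prepending each zeroed character (objective: simpler).

-- ===== PORT A =====
-- loop body of A; the state is (a, kq); Python's 1-char (or "10") strings are carried as List Char
def xuliStep (st : List (List Char) × List Char) (i : Int) : List (List Char) × List Char :=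
  let a := st.1
  let kq := st.2
  if (PySem.Int.ofChars? (PySem.List.pyGetD a i [])).getD 0 ≥ 5 ∧ 0 < i then
    let a := PySem.List.pySetD a i ['0']
    let a := PySem.List.pySetD a (i - 1)
      (PySem.Int.toChars ((PySem.Int.ofChars? (PySem.List.pyGetD a (i - 1) [])).getD 0 + 1))
    (a, PySem.List.pyGetD a i [] ++ kq)
  else
    let a := if 0 < i then PySem.List.pySetD a i ['0'] else a
    (a, PySem.List.pyGetD a i [] ++ kq)

def xuli (s : String) : String :=
  let a := s.toList.map (fun c => [c])
  if 1 < s.toList.length then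
    String.ofList ((PySem.List.pyRange ((s.toList.length : Int) - 1) (-1) (-1)).foldl xuliStep (a, [])).2
  else s

-- ===== PORT B =====
def xuli_alt (s : String) : String :=
  let cs := s.toList
  if cs.length ≤ 1 then s
  else
    let carry := (PySem.List.pyRange ((cs.length : Int) - 1) 0 (-1)).foldl
      (fun c i => if (PySem.Int.ofChars? [PySem.List.pyGetD cs i ' ']).getD 0 + c ≥ 5 then (1 : Int) else 0) 0
    String.ofList (PySem.Int.toChars ((PySem.Int.ofChars? [cs.getD 0 ' ']).getD 0 + carry)
      ++ List.replicate (cs.length - 1) '0')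

-- ===== PRECONDITION & SPEC =====
-- Pre_ excludes exactly the inputs on which A raises ValueError: strings of length ≥ 2 containing a non-digit character.
def Pre_xuli (s : String) : Prop := s.toList.length ≤ 1 ∨ s.toList.all Char.isDigit = true
instance (s : String) : Decidable (Pre_xuli s) := by unfold Pre_xuli; infer_instance
def pvWitness_xuli : String := "4951"

def Spec_xuli (s : String) (out : String) : Prop := out = xuli_alt s
instance (s : String) (out : String) : Decidable (Spec_xuli s out) := by unfold Spec_xuli; infer_instance

-- ===== CLAIM (what is proved, stated in full; the proofs are below) =====
def Claim_equal_xuli : Prop := ∀ (s : String), Dom_xuli s → Pre_xuli s → Spec_xuli s (xuli s)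

-- ===== LEMMAS AND PROOFS =====

def pvInd (d c : Int) : Int := if d + c ≥ 5 then 1 else 0

def pvCarryC (i : Nat) (w : Nat → Int) (c : Int) : Int :=
  ((List.range i).map (fun k => w (k + 1))).foldr pvInd c

def pvCarry (i : Nat) (w : Nat → Int) : Int := pvCarryC i w 0


lemma pvGetD_set_ne {α : Type} (l : List α) (n m : Nat) (v d : α) (h : n ≠ m) :
    (l.set n v).getD m d = l.getD m d := by
  simp [List.getD, List.getElem?_set_ne h]

lemma pvGetD_set_self {α : Type} (l : List α) (n : Nat) (v d : α) (h : n < l.length) :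
    (l.set n v).getD n d = v := by
  simp [List.getD, h]

lemma roundtrip_small (v : Int) (h0 : 0 ≤ v) (h1 : v ≤ 10) :
    PySem.Int.ofChars? (PySem.Int.toChars v) = some v := by
  interval_cases v <;> decide

lemma pvCarryC_succ (i : Nat) (w : Nat → Int) (c : Int) :
    pvCarryC (i + 1) w c = pvCarryC i w (pvInd (w (i + 1)) c) := by
  simp [pvCarryC, List.range_succ]

lemma pvCarryC_congr (i : Nat) (w w' : Nat → Int) (c : Int)
    (h : ∀ k, 1 ≤ k → k ≤ i → w' k = w k) :
    pvCarryC i w' c = pvCarryC i w c := by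
  unfold pvCarryC
  congr 1
  apply List.map_congr_left
  intro k hk
  exact h (k + 1) (by omega) (by simp at hk; omega)

lemma pvKey (i : Nat) (w : Nat → Int) (c : Int) :
    (if 0 = i then w i + c else w 0) + pvCarry i (fun j => if j = i then w i + c else w j)
      = w 0 + pvCarryC i w c := by
  cases i with
  | zero => simp [pvCarry, pvCarryC]
  | succ m =>
      rw [if_neg (by omega)]
      have h1 : pvCarry (m + 1) (fun j => if j = m + 1 then w (m + 1) + c else w j)
          = pvCarryC m w (pvInd (w (m + 1) + c) 0) := by
        rw [pvCarry, pvCarryC_succ]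
        rw [if_pos rfl]
        exact pvCarryC_congr m w _ _ (fun k h1 h2 => by simp [Nat.ne_of_lt (by omega : k < m + 1)])
      rw [h1, pvCarryC_succ]
      have : pvInd (w (m + 1) + c) 0 = pvInd (w (m + 1)) c := by
        unfold pvInd; split_ifs with a b <;> omega
      rw [this]

lemma loopA (i : Nat) : ∀ (a : List (List Char)) (kq : List Char) (w : Nat → Int),
    i < a.length →
    (∀ j, j ≤ i → 0 ≤ w j ∧ w j ≤ 10 ∧ (j < i → w j ≤ 9) ∧ a.getD j [] = PySem.Int.toChars (w j)) →
    ((PySem.List.pyRange (i : Int) (-1) (-1)).foldl xuliStep (a, kq)).2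
      = PySem.Int.toChars (w 0 + pvCarry i w) ++ List.replicate i '0' ++ kq := by
  induction i with
  | zero =>
      intro a kq w hlen hw
      rw [PySem.List.pyRange_neg_one_cons (by norm_num)]
      rw [show ((0:Nat):Int) - 1 = -1 by norm_num, PySem.List.pyRange_neg_one_eq_nil (le_refl _)]
      obtain ⟨_, _, _, hget⟩ := hw 0 (le_refl _)
      simp [xuliStep, pvCarry, pvCarryC, PySem.List.pyGetD_zero]
      simpa [List.getD] using hget
  | succ i ih =>
      intro a kq w hlen hw
      have hcast' : ((i + 1 : Nat) : Int) - 1 = (i : Int) := by push_cast; ring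
      rw [PySem.List.pyRange_neg_one_cons (by omega)]
      rw [List.foldl_cons, hcast']
      obtain ⟨hw0, hw10, _, hget⟩ := hw (i + 1) (le_refl _)
      have hgd : PySem.List.pyGetD a ((i + 1 : Nat) : Int) [] = PySem.Int.toChars (w (i + 1)) := by
        rw [PySem.List.pyGetD_natCast]; exact hget
      have hof : (PySem.Int.ofChars? (PySem.List.pyGetD a ((i + 1 : Nat) : Int) [])).getD 0 = w (i + 1) := by
        rw [hgd, roundtrip_small _ hw0 hw10]; rfl
      by_cases h5 : 5 ≤ w (i + 1)
      · -- carry branch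
        obtain ⟨hi0, hi10, hi9, higet⟩ := hw i (by omega)
        have hne : i + 1 ≠ i := by omega
        have hof1 : (PySem.Int.ofChars? ((a.set (i + 1) ['0']).getD i [])).getD 0 + 1 = w i + 1 := by
          rw [pvGetD_set_ne _ _ _ _ _ hne, higet, roundtrip_small _ hi0 (by omega)]; rfl
        have hstep : xuliStep (a, kq) ((i + 1 : Nat) : Int)
            = ((a.set (i + 1) ['0']).set i (PySem.Int.toChars (w i + 1)), '0' :: kq) := by
          unfold xuliStep
          rw [if_pos ⟨by rw [hof]; exact h5, by omega⟩]
          simp only [hcast', PySem.List.pySetD_natCast, PySem.List.pyGetD_natCast]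
          rw [hof1]
          refine Prod.ext rfl ?_
          show ((a.set (i + 1) ['0']).set i (PySem.Int.toChars (w i + 1))).getD (i + 1) [] ++ kq = '0' :: kq
          rw [pvGetD_set_ne _ _ _ _ _ (by omega : i ≠ i + 1),
            pvGetD_set_self _ _ _ _ (by simpa using hlen)]
          rfl
        rw [hstep]
        have hlen2 : i < ((a.set (i + 1) ['0']).set i (PySem.Int.toChars (w i + 1))).length := by
          simp; omega
        rw [ih _ ('0' :: kq) (fun j => if j = i then w i + 1 else w j) hlen2 ?hyp]
        · rw [pvKey i w 1]
          have : pvCarry (i + 1) w = pvCarryC i w 1 := by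
            rw [pvCarry, pvCarryC_succ]
            congr 1
            unfold pvInd; rw [if_pos (by omega)]
          rw [this]
          simp [List.replicate_succ']
        case hyp =>
          intro j hj
          rcases Nat.lt_or_ge j i with hji | hji
          · obtain ⟨h1, h2, h3, h4⟩ := hw j (by omega)
            refine ⟨?_, ?_, ?_, ?_⟩
            · show (0:Int) ≤ if j = i then w i + 1 else w j
              rw [if_neg (Nat.ne_of_lt hji)]; exact h1
            · show (if j = i then w i + 1 else w j) ≤ 10
              rw [if_neg (Nat.ne_of_lt hji)]; exact h2
            · intro _
              show (if j = i then w i + 1 else w j) ≤ 9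
              rw [if_neg (Nat.ne_of_lt hji)]; exact h3 (by omega)
            · show ((a.set (i + 1) ['0']).set i (PySem.Int.toChars (w i + 1))).getD j []
                = PySem.Int.toChars (if j = i then w i + 1 else w j)
              rw [if_neg (Nat.ne_of_lt hji),
                pvGetD_set_ne _ _ _ _ _ (Nat.ne_of_lt hji).symm,
                pvGetD_set_ne _ _ _ _ _ (by omega : i + 1 ≠ j)]
              exact h4
          · have hji' : j = i := by omega
            subst hji'
            refine ⟨?_, ?_, ?_, ?_⟩
            · show (0:Int) ≤ if j = j then w j + 1 else w j
              rw [if_pos rfl]; omega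
            · show (if j = j then w j + 1 else w j) ≤ 10
              rw [if_pos rfl]; have := hi9 (by omega); omega
            · intro h; exact absurd h (by omega)
            · show ((a.set (j + 1) ['0']).set j (PySem.Int.toChars (w j + 1))).getD j []
                = PySem.Int.toChars (if j = j then w j + 1 else w j)
              rw [if_pos rfl, pvGetD_set_self _ _ _ _ (by simp; omega)]
      · -- no-carry branch
        have hstep : xuliStep (a, kq) ((i + 1 : Nat) : Int)
            = (a.set (i + 1) ['0'], '0' :: kq) := by
          unfold xuliStep
          rw [if_neg (by rw [hof]; omega)]
          rw [if_pos (by omega : (0:Int) < ((i + 1 : Nat) : Int))]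
          simp only [PySem.List.pySetD_natCast, PySem.List.pyGetD_natCast]
          refine Prod.ext rfl ?_
          show (a.set (i + 1) ['0']).getD (i + 1) [] ++ kq = '0' :: kq
          rw [pvGetD_set_self _ _ _ _ (by simpa using hlen)]
          rfl
        rw [hstep]
        rw [ih _ ('0' :: kq) w (by simp; omega) ?hyp2]
        · have : pvCarry (i + 1) w = pvCarry i w := by
            rw [pvCarry, pvCarry, pvCarryC_succ]
            congr 1
            unfold pvInd; rw [if_neg (by omega)]
          rw [this]
          simp [List.replicate_succ']
        case hyp2 =>
          intro j hj
          obtain ⟨h1, h2, h3, h4⟩ := hw j (by omega)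
          refine ⟨h1, h2, fun _ => h3 (by omega), ?_⟩
          rw [pvGetD_set_ne _ _ _ _ _ (by omega : i + 1 ≠ j)]
          exact h4

lemma digit_single (c : Char) (h : c.isDigit = true) :
    PySem.Int.ofChars? [c] = some ((c.toNat : Int) - 48) ∧ [c] = PySem.Int.toChars ((c.toNat : Int) - 48) := by
  have hv : 48 ≤ c.val.toNat ∧ c.val.toNat ≤ 57 := by simp [Char.isDigit] at h; exact h
  have h1 : c = '0' ∨ c = '1' ∨ c = '2' ∨ c = '3' ∨ c = '4' ∨ c = '5' ∨ c = '6' ∨ c = '7' ∨ c = '8' ∨ c = '9' := by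
    obtain ⟨ha, hb⟩ := hv
    have h2 : c.val.toNat = 48 ∨ c.val.toNat = 49 ∨ c.val.toNat = 50 ∨ c.val.toNat = 51 ∨ c.val.toNat = 52 ∨ c.val.toNat = 53 ∨ c.val.toNat = 54 ∨ c.val.toNat = 55 ∨ c.val.toNat = 56 ∨ c.val.toNat = 57 := by omega
    rcases h2 with h2|h2|h2|h2|h2|h2|h2|h2|h2|h2
    all_goals first
      | (left; apply Char.ext; apply UInt32.toNat_inj.mp; rw [h2]; rfl)
      | (right; left; apply Char.ext; apply UInt32.toNat_inj.mp; rw [h2]; rfl)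
      | (right; right; left; apply Char.ext; apply UInt32.toNat_inj.mp; rw [h2]; rfl)
      | (right; right; right; left; apply Char.ext; apply UInt32.toNat_inj.mp; rw [h2]; rfl)
      | (right; right; right; right; left; apply Char.ext; apply UInt32.toNat_inj.mp; rw [h2]; rfl)
      | (right; right; right; right; right; left; apply Char.ext; apply UInt32.toNat_inj.mp; rw [h2]; rfl)
      | (right; right; right; right; right; right; left; apply Char.ext; apply UInt32.toNat_inj.mp; rw [h2]; rfl)
      | (right; right; right; right; right; right; right; left; apply Char.ext; apply UInt32.toNat_inj.mp; rw [h2]; rfl)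
      | (right; right; right; right; right; right; right; right; left; apply Char.ext; apply UInt32.toNat_inj.mp; rw [h2]; rfl)
      | (right; right; right; right; right; right; right; right; right; apply Char.ext; apply UInt32.toNat_inj.mp; rw [h2]; rfl)
  rcases h1 with h|h|h|h|h|h|h|h|h|h <;> subst h <;> exact ⟨by decide, by decide⟩

lemma foldr_congr_mem {α β : Type} (l : List α) (f g : α → β → β) (b : β)
    (h : ∀ a ∈ l, ∀ x, f a x = g a x) : l.foldr f b = l.foldr g b := by
  induction l with
  | nil => rfl
  | cons a t ih =>
      simp only [List.foldr_cons]
      rw [ih (fun a ha x => h a (List.mem_cons_of_mem _ ha) x), h a (List.mem_cons_self)]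

lemma xuli_eq_alt (s : String) (hpre : s.toList.length ≤ 1 ∨ s.toList.all Char.isDigit = true) :
    xuli s = xuli_alt s := by
  by_cases hlen : 1 < s.toList.length
  · have hdig : ∀ c ∈ s.toList, c.isDigit = true := by
      rcases hpre with h | h
      · omega
      · exact List.all_eq_true.mp h
    set cs := s.toList with hcs
    set n := cs.length with hn
    have hn2 : 2 ≤ n := hlen
    set w : Nat → Int := fun j => ((cs.getD j ' ').toNat : Int) - 48 with hw
    have hwj : ∀ j, j < n → (PySem.Int.ofChars? [cs.getD j ' '] = some (w j)
        ∧ [cs.getD j ' '] = PySem.Int.toChars (w j) ∧ 0 ≤ w j ∧ w j ≤ 9) := by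
      intro j hj
      have hmem : cs.getD j ' ' ∈ cs := by
        rw [List.getD_eq_getElem _ _ hj]
        exact List.getElem_mem hj
      have hd := hdig _ hmem
      obtain ⟨e1, e2⟩ := digit_single _ hd
      have hb : 48 ≤ (cs.getD j ' ').toNat ∧ (cs.getD j ' ').toNat ≤ 57 := by
        simp [Char.isDigit] at hd; exact hd
      refine ⟨e1, e2, ?_, ?_⟩
      · show (0:Int) ≤ ((cs.getD j ' ').toNat : Int) - 48
        omega
      · show ((cs.getD j ' ').toNat : Int) - 48 ≤ 9
        omega
    -- A side
    have hA : xuli s = String.ofList (PySem.Int.toChars (w 0 + pvCarry (n - 1) w)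
        ++ List.replicate (n - 1) '0') := by
      unfold xuli
      rw [← hcs, ← hn]
      rw [if_pos hlen]
      have hcast : ((n : Int) - 1) = ((n - 1 : Nat) : Int) := by omega
      rw [hcast]
      rw [loopA (n - 1) (cs.map (fun c => [c])) [] w (by simp; omega) ?h1]
      · simp
      case h1 =>
        intro j hj
        have hj' : j < n := by omega
        obtain ⟨e1, e2, e3, e4⟩ := hwj j hj'
        refine ⟨e3, by omega, fun _ => e4, ?_⟩
        have hmg : (cs.map (fun c => [c])).getD j [] = [cs.getD j ' '] := by
          simp [List.getD, List.getElem?_eq_getElem hj']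
        rw [hmg]
        exact e2
    -- B side
    have hcarry : (PySem.List.pyRange ((n : Int) - 1) 0 (-1)).foldl
        (fun c i => if (PySem.Int.ofChars? [PySem.List.pyGetD cs i ' ']).getD 0 + c ≥ 5 then (1 : Int) else 0) 0
        = pvCarry (n - 1) w := by
      rw [PySem.List.pyRange_neg_one_eq_reverse, List.foldl_reverse]
      rw [show ((0:Int) + 1) = 1 by norm_num, show ((n:Int) - 1 + 1) = (n:Int) by ring]
      rw [PySem.List.pyRange_one]
      rw [List.foldr_map]
      rw [pvCarry, pvCarryC, List.foldr_map]
      have hnn : ((n : Int) - 1).toNat = n - 1 := by omega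
      rw [hnn]
      apply foldr_congr_mem
      intro k hk x
      have hk' : k < n - 1 := List.mem_range.mp hk
      have hidx : (1 : Int) + (k : Int) = ((k + 1 : Nat) : Int) := by push_cast; ring
      rw [hidx, PySem.List.pyGetD_natCast]
      obtain ⟨e1, _, _, _⟩ := hwj (k + 1) (by omega)
      have hgd : cs.getD (k + 1) ' ' = cs.getD (k + 1) ' ' := rfl
      rw [e1]
      unfold pvInd
      rfl
    have hB : xuli_alt s = String.ofList (PySem.Int.toChars (w 0 + pvCarry (n - 1) w)
        ++ List.replicate (n - 1) '0') := by
      show (if cs.length ≤ 1 then s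
          else String.ofList (PySem.Int.toChars ((PySem.Int.ofChars? [cs.getD 0 ' ']).getD 0
              + (PySem.List.pyRange ((cs.length : Int) - 1) 0 (-1)).foldl
                (fun c i => if (PySem.Int.ofChars? [PySem.List.pyGetD cs i ' ']).getD 0 + c ≥ 5 then (1 : Int) else 0) 0)
            ++ List.replicate (cs.length - 1) '0'))
          = String.ofList (PySem.Int.toChars (w 0 + pvCarry (n - 1) w) ++ List.replicate (n - 1) '0')
      rw [← hn, if_neg (by omega)]
      obtain ⟨e1, _, _, _⟩ := hwj 0 (by omega)
      rw [hcarry, e1]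
      rfl
    rw [hA, hB]
  · simp only [xuli, xuli_alt]
    rw [if_neg hlen, if_pos (show s.toList.length ≤ 1 by omega)]

-- ===== VERDICT (by name: the statement is the Claim_ definition above) =====
theorem xuli_spec : Claim_equal_xuli := by
  intro s _ hpre
  unfold Spec_xuli
  exact xuli_eq_alt s hpre
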